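-- pv_equiv track=rewrite | github.com/mnicokar/Python-Level-2 | PS9-Class-Registration-II/main.py | generateWaitlist
-- ===== SOURCE A (Python) =====
-- def generateWaitlist(students):
--   enrolled = set()
--   waitlist = set()
--   for name in students:
--     if len(enrolled) < 6:
--       enrolled.add(name)
--     elif name not in enrolled:
--       waitlist.add(name)
--   return waitlist
-- ===== SOURCE B (Python) =====
-- def generateWaitlist(students):
--   unique = list(dict.fromkeys(students))
--   return set(unique[6:])
-- ===== Notes on version B (the rewrite author's own statement) =====
-- stated objective: idiomatic
-- what changed: Replaces A's per-name loop that incrementally fills a 6-slot enrolled set and classifies each name into enrolled/waitlist by a single ordered dedup (dict.fromkeys) followed by taking the tail after the first 6 distinct names.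
import Mathlib
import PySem

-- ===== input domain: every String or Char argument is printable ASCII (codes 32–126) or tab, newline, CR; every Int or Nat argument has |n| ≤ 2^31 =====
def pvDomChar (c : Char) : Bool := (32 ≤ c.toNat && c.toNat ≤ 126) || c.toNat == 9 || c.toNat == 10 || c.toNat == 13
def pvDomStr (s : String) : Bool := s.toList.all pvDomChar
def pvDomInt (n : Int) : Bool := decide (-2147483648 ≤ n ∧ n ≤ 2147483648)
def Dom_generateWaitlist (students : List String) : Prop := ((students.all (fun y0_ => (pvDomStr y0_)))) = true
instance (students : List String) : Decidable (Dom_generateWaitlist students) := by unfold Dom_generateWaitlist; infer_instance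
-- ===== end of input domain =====

-- B replaces A's per-name enrolled/waitlist classification loop by a one-pass ordered
-- dedup (dict.fromkeys) followed by taking the tail after the first 6 distinct names (idiomatic).

-- ===== PORT A =====
def generateWaitlist (students : List String) : List String :=
  (students.foldl
    (fun (st : PySem.Set String × PySem.Set String) name =>
      if PySem.Set.len st.1 < 6 then (PySem.Set.add st.1 name, st.2)
      else if !(PySem.Set.contains st.1 name) then (st.1, PySem.Set.add st.2 name)
      else st)
    (PySem.Set.empty, PySem.Set.empty)).2

-- ===== PORT B =====
def generateWaitlist_alt (students : List String) : List String :=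
  let unique := PySem.List.dedup students
  PySem.Set.ofList (PySem.List.slice unique (some 6) none)

-- ===== PRECONDITION & SPEC =====
def Spec_generateWaitlist (students : List String) (out : List String) : Prop := out = generateWaitlist_alt students
instance (students : List String) (out : List String) : Decidable (Spec_generateWaitlist students out) := by unfold Spec_generateWaitlist; infer_instance

-- ===== CLAIM (what is proved, stated in full; the proofs are below) =====
def Claim_equal_generateWaitlist : Prop := ∀ (students : List String), Dom_generateWaitlist students → Spec_generateWaitlist students (generateWaitlist students)

-- ===== LEMMAS AND PROOFS =====

-- A's loop body, named for the proofs (definitionally the lambda inside generateWaitlist)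
def pvStepA (st : PySem.Set String × PySem.Set String) (name : String) :
    PySem.Set String × PySem.Set String :=
  if PySem.Set.len st.1 < 6 then (PySem.Set.add st.1 name, st.2)
  else if !(PySem.Set.contains st.1 name) then (st.1, PySem.Set.add st.2 name)
  else st

lemma generateWaitlist_eq_foldl (students : List String) :
    generateWaitlist students = (students.foldl pvStepA ([], [])).2 := rfl

lemma add_eq (s : PySem.Set String) (x : String) :
    PySem.Set.add s x = if x ∈ s then s else s ++ [x] := by
  simp [PySem.Set.add, PySem.Set.contains]

lemma contains_eq (s : PySem.Set String) (x : String) :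
    PySem.Set.contains s x = decide (x ∈ s) := by
  simp [PySem.Set.contains]

lemma mem_add_self (s : PySem.Set String) (n : String) : n ∈ PySem.Set.add s n := by
  rw [add_eq]; split_ifs with h
  · exact h
  · exact List.mem_append.2 (Or.inr (by simp))

-- update of a prefixed set: the prefix stays, appended part sees only names outside the prefix
lemma foldl_add_prefix (l : List String) : ∀ (e d : List String),
    List.foldl PySem.Set.add (e ++ d) l
      = e ++ List.foldl PySem.Set.add d (l.filter (fun x => !(e.contains x))) := by
  induction l with
  | nil => intro e d; simp
  | cons n l ih =>
    intro e d
    rw [List.foldl_cons, List.filter_cons, add_eq]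
    by_cases h : n ∈ e
    · have hce : e.contains n = true := by simpa [List.contains_iff_mem] using h
      rw [if_pos (List.mem_append.2 (Or.inl h))]
      simp only [hce, Bool.not_true, Bool.false_eq_true, if_false]
      exact ih e d
    · have hce : e.contains n = false := by simpa [List.contains_iff_mem] using h
      simp only [hce, Bool.not_false, if_pos]
      by_cases hd : n ∈ d
      · rw [if_pos (List.mem_append.2 (Or.inr hd))]
        rw [List.foldl_cons, add_eq, if_pos hd]
        exact ih e d
      · rw [if_neg (by simp [h, hd]), List.append_assoc]
        rw [List.foldl_cons, add_eq, if_neg hd]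
        exact ih e (d ++ [n])

-- building a set commutes with filtering (dedup/filter commute)
lemma foldl_add_filter (p : String → Bool) (q : List String) : ∀ (d : List String),
    (List.foldl PySem.Set.add d q).filter p
      = List.foldl PySem.Set.add (d.filter p) (q.filter p) := by
  induction q with
  | nil => intro d; rfl
  | cons x q ih =>
    intro d
    rw [List.foldl_cons, List.filter_cons, ih (PySem.Set.add d x)]
    by_cases hp : p x = true
    · have hadd : (PySem.Set.add d x).filter p = PySem.Set.add (d.filter p) x := by
        rw [add_eq, add_eq]
        by_cases hd : x ∈ d
        · rw [if_pos hd, if_pos (List.mem_filter.2 ⟨hd, hp⟩)]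
        · rw [if_neg hd, if_neg (fun hm => hd (List.mem_filter.1 hm).1),
            List.filter_append]
          simp [hp]
      rw [hadd]
      simp only [hp, if_pos]
      rw [List.foldl_cons]
    · have hpf : p x = false := by simpa using hp
      have hadd : (PySem.Set.add d x).filter p = d.filter p := by
        rw [add_eq]; split_ifs with h
        · rfl
        · rw [List.filter_append]; simp [hpf]
      rw [hadd]
      simp only [hpf, Bool.false_eq_true, if_false]

-- adding names already present in the set is a no-op
lemma foldl_add_drop_mem (n : String) (m : List String) : ∀ (s : PySem.Set String),
    n ∈ s →
    List.foldl PySem.Set.add s (m.filter (fun x => !(x == n)))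
      = List.foldl PySem.Set.add s m := by
  induction m with
  | nil => intro s _; rfl
  | cons x m ih =>
    intro s hs
    rw [List.filter_cons]
    by_cases hx : x = n
    · have hb : (x == n) = true := by simp [hx]
      have habs : PySem.Set.add s x = s := by
        rw [add_eq, if_pos (hx ▸ hs)]
      simp only [hb, Bool.not_true, Bool.false_eq_true, if_false]
      rw [List.foldl_cons, habs]
      exact ih s hs
    · have hb : (x == n) = false := by simp [hx]
      have hs' : n ∈ PySem.Set.add s x := by
        rw [add_eq]; split_ifs with h
        · exact hs
        · exact List.mem_append.2 (Or.inl hs)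
      simp only [hb, Bool.not_false, if_pos]
      rw [List.foldl_cons, List.foldl_cons]
      exact ih (PySem.Set.add s x) hs'

-- the loop invariant: A's waitlist is w updated with everything past the first 6 of the enrolled set
lemma loop_lemma (l : List String) : ∀ (e w : List String), e.length ≤ 6 →
    (List.foldl pvStepA (e, w) l).2
      = List.foldl PySem.Set.add w ((List.foldl PySem.Set.add e l).drop 6) := by
  induction l with
  | nil =>
    intro e w he
    simp [List.drop_eq_nil_of_le he]
  | cons n l ih =>
    intro e w he
    by_cases hlt : PySem.Set.len e < 6
    · have hstep : pvStepA (e, w) n = (PySem.Set.add e n, w) := by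
        simp only [pvStepA]; rw [if_pos hlt]
      have hl' : e.length < 6 := by
        have : ((e.length : Int)) < 6 := hlt
        exact_mod_cast this
      have hlen : (PySem.Set.add e n).length ≤ 6 := by
        rw [add_eq]; split_ifs
        · omega
        · simp; omega
      rw [List.foldl_cons, hstep, List.foldl_cons]
      exact ih (PySem.Set.add e n) w hlen
    · have he6 : e.length = 6 := by
        have : (6 : Int) ≤ (e.length : Int) := not_lt.1 hlt
        omega
      by_cases hc : n ∈ e
      · have hce : PySem.Set.contains e n = true := by
          rw [contains_eq]; simpa using hc
        have hstep : pvStepA (e, w) n = (e, w) := by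
          simp only [pvStepA]
          rw [if_neg hlt, hce]
          simp
        have hadd : PySem.Set.add e n = e := by rw [add_eq, if_pos hc]
        rw [List.foldl_cons, hstep, List.foldl_cons, hadd]
        exact ih e w he
      · have hce : PySem.Set.contains e n = false := by
          rw [contains_eq]; simpa using hc
        have hstep : pvStepA (e, w) n = (e, PySem.Set.add w n) := by
          simp only [pvStepA]
          rw [if_neg hlt, hce]
          simp
        have hadd : PySem.Set.add e n = e ++ [n] := by rw [add_eq, if_neg hc]
        rw [List.foldl_cons, hstep, List.foldl_cons, hadd]
        rw [ih e (PySem.Set.add w n) he]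
        have hL : List.foldl PySem.Set.add e l
            = e ++ List.foldl PySem.Set.add [] (l.filter (fun x => !(e.contains x))) := by
          simpa using foldl_add_prefix l e []
        have hR : List.foldl PySem.Set.add (e ++ [n]) l
            = (e ++ [n]) ++ List.foldl PySem.Set.add []
                (l.filter (fun x => !((e ++ [n]).contains x))) := by
          simpa using foldl_add_prefix l (e ++ [n]) []
        rw [hL, hR]
        have hdropL : (e ++ List.foldl PySem.Set.add []
              (l.filter (fun x => !(e.contains x)))).drop 6
            = List.foldl PySem.Set.add [] (l.filter (fun x => !(e.contains x))) := by
          rw [← he6, List.drop_left]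
        have hdropR : ((e ++ [n]) ++ List.foldl PySem.Set.add []
              (l.filter (fun x => !((e ++ [n]).contains x)))).drop 6
            = n :: List.foldl PySem.Set.add []
                (l.filter (fun x => !((e ++ [n]).contains x))) := by
          rw [List.append_assoc, ← he6, List.drop_left]
          rfl
        rw [hdropL, hdropR]
        rw [show List.foldl PySem.Set.add w
            (n :: List.foldl PySem.Set.add []
              (l.filter (fun x => !((e ++ [n]).contains x))))
            = List.foldl PySem.Set.add (PySem.Set.add w n)
              (List.foldl PySem.Set.add []
                (l.filter (fun x => !((e ++ [n]).contains x)))) from rfl]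
        have hfilt : l.filter (fun x => !((e ++ [n]).contains x))
            = (l.filter (fun x => !(e.contains x))).filter (fun x => !(x == n)) := by
          rw [List.filter_filter]
          apply List.filter_congr
          intro x _
          cases hb : (x == n) <;> cases hcx : e.contains x <;>
            simp_all
        rw [hfilt]
        have hcomm := foldl_add_filter (fun x => !(x == n))
          (l.filter (fun x => !(e.contains x))) []
        simp only [List.filter_nil] at hcomm
        rw [← hcomm]
        exact (foldl_add_drop_mem n _ (PySem.Set.add w n) (mem_add_self w n)).symm

-- ===== VERDICT (by name: the statement is the Claim_ definition above) =====
theorem generateWaitlist_spec : Claim_equal_generateWaitlist := by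
  intro students _
  unfold Spec_generateWaitlist
  show generateWaitlist students = generateWaitlist_alt students
  rw [generateWaitlist_eq_foldl, generateWaitlist_alt]
  rw [PySem.List.dedup_eq_ofList, PySem.List.slice_from _ (by norm_num)]
  rw [loop_lemma students [] [] (by simp)]
  rfl
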